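-- pv_equiv track=rewrite | github.com/yoichironambu/SolidDesigner | Designer/Data/Scripts/generate_solid_designer_commands.py | id_to_const_name
-- ===== SOURCE A (Python) =====
-- def id_to_const_name(cmd_id: str) -> str:
--     """
--     Convert 'file.save' -> 'FILE_SAVE'
--     """
--     result_chars = []
--     for ch in cmd_id:
--         if ch.isalnum():
--             result_chars.append(ch.upper())
--         else:
--             # '.' '-' ' ' 等全部归一成 '_'
--             result_chars.append('_')
--     name = "".join(result_chars)
--
--     # 去掉重复的 '_'（比如 ".."）
--     while "__" in name:
--         name = name.replace("__", "_")
--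
--     # 去掉头尾 '_'
--     name = name.strip("_")
--
--     # 如果第一个字符是数字，前面加前缀
--     if name and name[0].isdigit():
--         name = "CMD_" + name
--
--     if not name:
--         raise ValueError(f"Cannot convert command id '{cmd_id}' to a valid C++ name")
--
--     return name
-- ===== SOURCE B (Python) =====
-- def id_to_const_name(cmd_id: str) -> str:
--     """
--     Convert 'file.save' -> 'FILE_SAVE'
--     """
--     tokens = []
--     current = ""
--     for ch in cmd_id:
--         if ch.isalnum():
--             current += ch.upper()
--         elif current:
--             tokens.append(current)
--             current = ""
--     if current:
--         tokens.append(current)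
--
--     name = "_".join(tokens)
--
--     if name and name[0].isdigit():
--         name = "CMD_" + name
--
--     if not name:
--         raise ValueError(f"Cannot convert command id '{cmd_id}' to a valid C++ name")
--
--     return name
-- ===== Notes on version B (the rewrite author's own statement) =====
-- stated objective: simpler
-- what changed: B replaces A's map-every-char-to-'_', repeatedly-replace-'__'-until-fixpoint, then strip-'_' pipeline by a single pass that collects the uppercased alphanumeric runs as tokens and joins them with '_', which handles collapsing and end-stripping at once.
-- outside the precondition, e.g. on id_to_const_name('_'): A raises ValueError, B raises ValueError; on id_to_const_name('__'): A raises ValueError, B raises ValueError; on id_to_const_name('..--..'): A raises ValueError, B raises ValueError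
import Mathlib
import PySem

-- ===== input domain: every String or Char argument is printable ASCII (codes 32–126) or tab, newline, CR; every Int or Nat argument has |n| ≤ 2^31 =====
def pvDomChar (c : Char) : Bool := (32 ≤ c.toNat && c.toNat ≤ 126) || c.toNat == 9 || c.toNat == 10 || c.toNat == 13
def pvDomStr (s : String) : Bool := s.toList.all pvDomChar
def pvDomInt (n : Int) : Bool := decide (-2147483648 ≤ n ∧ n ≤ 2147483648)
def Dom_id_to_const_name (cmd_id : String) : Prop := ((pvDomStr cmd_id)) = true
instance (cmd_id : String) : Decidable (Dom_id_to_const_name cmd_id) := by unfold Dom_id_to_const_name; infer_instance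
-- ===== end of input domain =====

-- B replaces A's map→collapse-"__"→strip-"_" pipeline by a single-pass tokenizer (collect
-- uppercased alnum runs, join with "_"); objective: simpler (one pass, no repeated replace).

-- ===== PORT A =====
-- pvRep: one left-to-right pass of name.replace("__", "_") (used only to prove that the
-- while-loop of A terminates; the port itself calls PySem.Chars.replace).
def pvRep : List Char → List Char
  | [] => []
  | c :: t =>
    if (c == '_') && (t.head? == some '_') then '_' :: pvRep t.tail else c :: pvRep t
termination_by l => l.length
decreasing_by
  · simp only [List.length_tail, List.length_cons]; omega
  · simp

theorem pvRep_go (fuel : Nat) (l acc : List Char) (h : l.length ≤ fuel) :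
    PySem.Chars.replace.go ['_', '_'] ['_'] fuel l acc = acc.reverse ++ pvRep l := by
  induction fuel generalizing l acc with
  | zero =>
    have : l = [] := List.eq_nil_of_length_eq_zero (Nat.le_zero.mp h)
    subst this; simp [PySem.Chars.replace.go, pvRep]
  | succ n ih =>
    match l with
    | [] => simp [PySem.Chars.replace.go, pvRep]
    | c :: t =>
      by_cases hp : List.isPrefixOf ['_', '_'] (c :: t)
      · have hps : c = '_' ∧ ∃ t', t = '_' :: t' := by
          cases t with
          | nil => simp [List.isPrefixOf] at hp
          | cons c' t' =>
            simp [List.isPrefixOf] at hp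
            exact ⟨hp.1.symm, t', by rw [hp.2]⟩
        obtain ⟨hc, t', ht⟩ := hps
        subst hc; subst ht
        rw [show PySem.Chars.replace.go ['_','_'] ['_'] (n+1) ('_'::'_'::t') acc
            = PySem.Chars.replace.go ['_','_'] ['_'] n (List.drop 2 ('_'::'_'::t')) (['_'].reverse ++ acc) by
          simp [PySem.Chars.replace.go, hp]]
        rw [ih (List.drop 2 ('_'::'_'::t')) _ (by simp at h ⊢; omega)]
        rw [show pvRep ('_'::'_'::t') = '_' :: pvRep t' by rw [pvRep]; simp]
        simp
      · have hcond : ((c == '_') && (t.head? == some '_')) = false := by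
          by_contra hcc
          simp only [Bool.not_eq_false, Bool.and_eq_true, beq_iff_eq] at hcc
          obtain ⟨hc, hh⟩ := hcc
          cases t with
          | nil => simp at hh
          | cons d x =>
            simp at hh
            exact hp (by simp [List.isPrefixOf, hc, hh])
        rw [show PySem.Chars.replace.go ['_','_'] ['_'] (n+1) (c::t) acc
            = PySem.Chars.replace.go ['_','_'] ['_'] n t (c :: acc) by
          simp [PySem.Chars.replace.go, hp]]
        rw [ih t (c :: acc) (by simp at h; omega)]
        rw [show pvRep (c :: t) = c :: pvRep t by rw [pvRep]; simp [hcond]]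
        simp

theorem pvReplace_eq (s : List Char) :
    PySem.Chars.replace s ['_', '_'] ['_'] = pvRep s := by
  rw [PySem.Chars.replace]
  simp [pvRep_go s.length s [] (le_refl _)]

theorem pvRep_length_le (s : List Char) : (pvRep s).length ≤ s.length := by
  fun_induction pvRep s with
  | case1 => simp
  | case2 c t hcond ih =>
    simp [List.length_tail] at ih ⊢; omega
  | case3 c t hcond ih => simp at ih ⊢; omega

theorem pvRep_length_lt (s : List Char) (h : ['_','_'] <:+: s) :
    (pvRep s).length < s.length := by
  fun_induction pvRep s with
  | case1 => simp at h
  | case2 c t hcond ih =>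
    have := pvRep_length_le t.tail
    have := List.length_tail (l := t)
    have ht : t ≠ [] := by
      intro hh; subst hh
      simp at hcond
    have := List.length_pos_iff.mpr ht
    simp; omega
  | case3 c t hcond ih =>
    rcases List.infix_cons_iff.mp h with hpre | hinf
    · exfalso
      rcases hpre with ⟨r, hr⟩
      simp at hr
      obtain ⟨hc, ht⟩ := hr
      simp [← hc, ← ht] at hcond
    · simp [ih hinf]

-- while "__" in name: name = name.replace("__", "_")
def collapseA (name : List Char) : List Char :=
  if PySem.Chars.isIn ['_', '_'] name then
    collapseA (PySem.Chars.replace name ['_', '_'] ['_'])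
  else name
termination_by name.length
decreasing_by
  rename_i h
  rw [pvReplace_eq]
  exact pvRep_length_lt _ ((PySem.Chars.isIn_iff_infix _ _).mp h)

def id_to_const_name (cmd_id : String) : String :=
  -- for ch in cmd_id: append ch.upper() if ch.isalnum() else '_'
  let resultChars := cmd_id.toList.foldl
    (fun acc ch => acc ++ [if PySem.Chars.isalnum ch then PySem.Chars.upperChar ch else '_']) []
  let name := collapseA resultChars
  let name := PySem.Chars.stripChars name ['_']
  let name := if name ≠ [] ∧ PySem.Chars.isdigit (name.headD ' ')
              then 'C' :: 'M' :: 'D' :: '_' :: name else name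
  if name = [] then "" else String.ofList name   -- [] = the ValueError path (outside Pre_)

-- ===== PORT B =====
def bStep (st : List (List Char) × List Char) (ch : Char) : List (List Char) × List Char :=
  if PySem.Chars.isalnum ch then (st.1, st.2 ++ [PySem.Chars.upperChar ch])
  else if st.2 ≠ [] then (st.1 ++ [st.2], []) else st

def id_to_const_name_alt (cmd_id : String) : String :=
  let st := cmd_id.toList.foldl bStep ([], [])
  let tokens := if st.2 ≠ [] then st.1 ++ [st.2] else st.1
  let name := PySem.Chars.join ['_'] tokens
  let name := if name ≠ [] ∧ PySem.Chars.isdigit (name.headD ' ')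
              then 'C' :: 'M' :: 'D' :: '_' :: name else name
  if name = [] then "" else String.ofList name   -- [] = the ValueError path (outside Pre_)

-- ===== PRECONDITION & SPEC =====
-- Pre_ excludes exactly the inputs with no alphanumeric character: there Python A
-- (and Python B alike) raises ValueError.
def Pre_id_to_const_name (cmd_id : String) : Prop :=
  cmd_id.toList.any PySem.Chars.isalnum = true
instance (cmd_id : String) : Decidable (Pre_id_to_const_name cmd_id) := by
  unfold Pre_id_to_const_name; infer_instance

def pvWitness_id_to_const_name : String := "file.save"

def Spec_id_to_const_name (cmd_id : String) (out : String) : Prop := out = id_to_const_name_alt cmd_id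
instance (cmd_id : String) (out : String) : Decidable (Spec_id_to_const_name cmd_id out) := by
  unfold Spec_id_to_const_name; infer_instance

-- ===== CLAIM (what is proved, stated in full; the proofs are below) =====
def Claim_equal_id_to_const_name : Prop := ∀ (cmd_id : String), Dom_id_to_const_name cmd_id → Pre_id_to_const_name cmd_id → Spec_id_to_const_name cmd_id (id_to_const_name cmd_id)

-- ===== LEMMAS AND PROOFS =====

-- the character map of A's first loop
def fA (c : Char) : Char := if PySem.Chars.isalnum c then PySem.Chars.upperChar c else '_'

-- run-collapse normal form of A's while-replace loop
def col : List Char → List Char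
  | [] => []
  | c :: t => if (c == '_') && (t.head? == some '_') then col t else c :: col t

def dropUnd (l : List Char) : List Char := l.dropWhile (· == '_')

-- the maximal runs of non-'_' characters
def toks : List Char → List (List Char)
  | [] => []
  | c :: t =>
    if c == '_' then toks t
    else (c :: t.takeWhile (· != '_')) :: toks (t.dropWhile (· != '_'))
termination_by l => l.length
decreasing_by all_goals simp [List.length_dropWhile_le]

-- B's loop written as structural recursion over the MAPPED characters
def runsM : List Char → List Char → List (List Char)
  | cur, [] => if cur = [] then [] else [cur]
  | cur, c :: t =>
    if c == '_' then (if cur = [] then runsM [] t else cur :: runsM [] t)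
    else runsM (cur ++ [c]) t

def joinU : List (List Char) → List Char
  | [] => []
  | [t] => t
  | t :: r => t ++ '_' :: joinU r

def rstripU (l : List Char) : List Char := (l.reverse.dropWhile (· == '_')).reverse

theorem col_cons_ne (c : Char) (t : List Char) (h : (c == '_') = false) :
    col (c :: t) = c :: col t := by
  rw [col]; simp [h]

theorem col_underscore (v : List Char) : col ('_' :: v) = '_' :: col (dropUnd v) := by
  induction v with
  | nil => simp [col, dropUnd]
  | cons d w ih =>
    by_cases hd : (d == '_') = true
    · have hd' : d = '_' := by simpa using hd
      subst hd'
      rw [show col ('_' :: '_' :: w) = col ('_' :: w) by rw [col]; simp]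
      rw [ih]
      simp [dropUnd]
    · rw [show col ('_' :: d :: w) = '_' :: col (d :: w) by rw [col]; simp [hd]]
      simp only [Bool.not_eq_true] at hd
      simp [dropUnd, hd]

theorem col_run (run b : List Char) (h : ∀ x ∈ run, (x == '_') = false) :
    col (run ++ b) = run ++ col b := by
  induction run with
  | nil => simp
  | cons x r ih =>
    have hx : (x == '_') = false := h x (by simp)
    rw [List.cons_append, col_cons_ne x (r ++ b) hx,
        ih (fun y hy => h y (by simp [hy]))]
    simp

theorem col_no_dd (s : List Char) (h : ¬ ['_', '_'] <:+: s) : col s = s := by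
  induction s with
  | nil => rfl
  | cons c t ih =>
    have hcond : ((c == '_') && (t.head? == some '_')) = false := by
      by_contra hcc
      simp only [Bool.not_eq_false, Bool.and_eq_true, beq_iff_eq] at hcc
      obtain ⟨hc, hh⟩ := hcc
      cases t with
      | nil => simp at hh
      | cons d x =>
        simp at hh
        exact h ⟨[], x, by simp [hc, hh]⟩
    rw [col]
    simp only [hcond, if_false, Bool.false_eq_true]
    rw [ih (fun hi => h (List.infix_cons hi))]

theorem pvRep_head? (l : List Char) : (pvRep l).head? = l.head? := by
  fun_induction pvRep l with
  | case1 => rfl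
  | case2 c t hcond ih =>
    simp only [Bool.and_eq_true, beq_iff_eq] at hcond
    simp [hcond.1]
  | case3 => simp

theorem dropUnd_pvRep (s : List Char) : dropUnd (pvRep s) = pvRep (dropUnd s) := by
  fun_induction pvRep s with
  | case1 => simp [dropUnd, pvRep]
  | case2 c t hcond ih =>
    simp only [Bool.and_eq_true, beq_iff_eq] at hcond
    obtain ⟨hc, hh⟩ := hcond
    subst hc
    cases t with
    | nil => simp at hh
    | cons d t2 =>
      have hd : d = '_' := by simpa using hh
      subst hd
      have h1 : dropUnd ('_' :: pvRep t2) = dropUnd (pvRep t2) := by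
        simp [dropUnd]
      have h2 : dropUnd ('_' :: '_' :: t2) = dropUnd t2 := by
        simp [dropUnd]
      simp only [List.tail_cons] at ih ⊢
      rw [h1, h2, ih]
  | case3 c t hcond ih =>
    by_cases hc : (c == '_') = true
    · have hc' : c = '_' := by simpa using hc
      subst hc'
      rw [show dropUnd ('_' :: pvRep t) = dropUnd (pvRep t) by simp [dropUnd]]
      rw [show dropUnd ('_' :: t) = dropUnd t by simp [dropUnd]]
      exact ih
    · rw [show dropUnd (c :: pvRep t) = c :: pvRep t by simp_all [dropUnd]]
      rw [show dropUnd (c :: t) = c :: t by simp_all [dropUnd]]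
      rw [pvRep]
      simp_all

theorem col_rep_aux (n : Nat) : ∀ s : List Char, s.length ≤ n → col (pvRep s) = col s := by
  induction n with
  | zero =>
    intro s hs
    have : s = [] := List.eq_nil_of_length_eq_zero (Nat.le_zero.mp hs)
    subst this; simp [pvRep]
  | succ n ih =>
    intro s hs
    match s with
    | [] => simp [pvRep]
    | c :: t =>
      by_cases hcond : ((c == '_') && (t.head? == some '_')) = true
      · obtain ⟨hc, hh⟩ := by simpa only [Bool.and_eq_true, beq_iff_eq] using hcond
        subst hc
        cases t with
        | nil => simp at hh
        | cons d t2 =>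
          have hd : d = '_' := by simpa using hh
          subst hd
          rw [show pvRep ('_' :: '_' :: t2) = '_' :: pvRep t2 by rw [pvRep]; simp]
          rw [show col ('_' :: '_' :: t2) = col ('_' :: t2) by rw [col]; simp]
          rw [col_underscore, col_underscore, dropUnd_pvRep]
          rw [ih (dropUnd t2) (by
            have := List.length_dropWhile_le (· == '_') t2
            simp [dropUnd] at *; omega)]
      · have hcond' : ((c == '_') && (t.head? == some '_')) = false := by simpa using hcond
        rw [show pvRep (c :: t) = c :: pvRep t by rw [pvRep]; simp [hcond']]
        rw [show col (c :: pvRep t) = c :: col (pvRep t) by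
          rw [col]; rw [pvRep_head?]; simp [hcond']]
        rw [show col (c :: t) = c :: col t by rw [col]; simp [hcond']]
        rw [ih t (by simp at hs; omega)]

theorem col_rep (s : List Char) : col (pvRep s) = col s := col_rep_aux s.length s le_rfl

theorem collapseA_eq_col (s : List Char) : collapseA s = col s := by
  fun_induction collapseA s with
  | case1 s hin ih =>
    rw [pvReplace_eq] at ih ⊢
    rw [ih, col_rep]
  | case2 s hin =>
    exact (col_no_dd s (fun hi => hin ((PySem.Chars.isIn_iff_infix _ _).mpr hi))).symm

theorem toks_dropUnd (w : List Char) : toks (dropUnd w) = toks w := by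
  induction w with
  | nil => rfl
  | cons c t ih =>
    by_cases hc : (c == '_') = true
    · rw [show toks (c :: t) = toks t by rw [toks]; simp [hc], ← ih]
      simp [dropUnd, hc]
    · simp only [Bool.not_eq_true] at hc
      simp [dropUnd, hc]

theorem dropUnd_col (u : List Char) (hu : dropUnd u = u) : dropUnd (col u) = col u := by
  cases u with
  | nil => rfl
  | cons c t =>
    have hc : (c == '_') = false := by
      by_contra hcc
      simp only [Bool.not_eq_false] at hcc
      have h2 := congrArg List.length hu
      have := List.length_dropWhile_le (· == '_') t
      simp [dropUnd, hcc] at h2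
      omega
    rw [col_cons_ne c t hc]
    simp [dropUnd, hc]

theorem lstrip_col (m : List Char) : dropUnd (col m) = col (dropUnd m) := by
  cases m with
  | nil => rfl
  | cons c v =>
    by_cases hc : (c == '_') = true
    · have hc' : c = '_' := by simpa using hc
      subst hc'
      rw [col_underscore]
      have h1 : dropUnd ('_' :: col (dropUnd v)) = dropUnd (col (dropUnd v)) := by
        simp [dropUnd]
      rw [h1, dropUnd_col (dropUnd v) (by simp [dropUnd, List.dropWhile_idempotent])]
      have h3 : dropUnd ('_' :: v) = dropUnd v := by
        simp [dropUnd]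
      rw [h3]
    · simp only [Bool.not_eq_true] at hc
      have h1 : dropUnd (c :: col v) = c :: col v := by
        simp [dropUnd, hc]
      have h2 : dropUnd (c :: v) = c :: v := by
        simp [dropUnd, hc]
      rw [col_cons_ne c v hc, h1, h2, col_cons_ne c v hc]

theorem rstrip_all_ne (l : List Char) (h : ∀ x ∈ l, (x == '_') = false) : rstripU l = l := by
  unfold rstripU
  have hself : List.dropWhile (· == '_') l.reverse = l.reverse := by
    rw [List.dropWhile_eq_self_iff]
    intro hl
    have hm : l.reverse[0] ∈ l := by simpa using List.getElem_mem hl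
    simpa using h _ hm
  rw [hself, List.reverse_reverse]

theorem rstrip_append_single (l : List Char) : rstripU (l ++ ['_']) = rstripU l := by
  unfold rstripU
  rw [show (l ++ ['_']).reverse = '_' :: l.reverse by simp]
  rw [List.dropWhile_cons]
  simp

theorem rstrip_cons_ne_nil (d : Char) (l : List Char) (hd : (d == '_') = false) :
    rstripU (d :: l) ≠ [] := by
  unfold rstripU
  rw [show (d :: l).reverse = l.reverse ++ [d] by simp]
  rw [List.dropWhile_append]
  split
  · simp [hd]
  · simp

theorem rstrip_append (x y : List Char) (h : rstripU y ≠ []) :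
    rstripU (x ++ y) = x ++ rstripU y := by
  unfold rstripU at *
  rw [List.reverse_append, List.dropWhile_append]
  have hne : (List.dropWhile (· == '_') y.reverse).isEmpty = false := by
    rcases hres : List.dropWhile (· == '_') y.reverse with _ | _
    · simp [hres] at h
    · simp
  rw [if_neg (by simp [hne])]
  simp

theorem joinU_cons_ne_nil (t : List Char) (r : List (List Char)) (h : r ≠ []) :
    joinU (t :: r) = t ++ '_' :: joinU r := by
  match r, h with
  | q :: r', _ => rfl

theorem mainA_aux (n : Nat) : ∀ u : List Char, u.length ≤ n → dropUnd u = u →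
    rstripU (col u) = joinU (toks u) := by
  induction n with
  | zero =>
    intro u hn hu
    have : u = [] := List.eq_nil_of_length_eq_zero (Nat.le_zero.mp hn)
    subst this; simp [toks, col, rstripU, joinU]
  | succ n ih =>
    intro u hn hu
    match u with
    | [] => simp [toks, col, rstripU, joinU]
    | c :: t =>
      have hc : (c == '_') = false := by
        by_contra hcc
        simp only [Bool.not_eq_false] at hcc
        have h2 := congrArg List.length hu
        have := List.length_dropWhile_le (· == '_') t
        simp [dropUnd, hcc] at h2
        omega
      set a := t.takeWhile (· != '_') with ha_def
      set b := t.dropWhile (· != '_') with hb_def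
      have ht : a ++ b = t := List.takeWhile_append_dropWhile
      have hca : ∀ x ∈ c :: a, (x == '_') = false := by
        intro x hx
        rcases List.mem_cons.mp hx with hx | hx
        · subst hx; exact hc
        · have := List.mem_takeWhile_imp (by simpa [ha_def] using hx)
          simpa using this
      have hcl : col (c :: t) = (c :: a) ++ col b := by
        rw [show c :: t = (c :: a) ++ b by simp [ht]]
        exact col_run (c :: a) b hca
      have htk : toks (c :: t) = (c :: a) :: toks b := by
        rw [toks]
        simp only [hc, Bool.false_eq_true, if_false]
        rw [← ha_def, ← hb_def]
      rcases hb : b with _ | ⟨e, w⟩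
      · rw [hcl, htk, hb]
        simp only [col, List.append_nil]
        rw [rstrip_all_ne _ hca]
        rw [show toks ([] : List Char) = [] by simp [toks]]
        rfl
      · have he : e = '_' := by
          have hdw : List.dropWhile (· != '_') t = e :: w := by rw [← hb_def, hb]
          have := List.head_dropWhile_not (· != '_') (l := t) (by simp [hdw])
          simp only [hdw, List.head_cons] at this
          simpa using this
        subst he
        rw [hcl, htk, hb, col_underscore]
        rcases hw : dropUnd w with _ | ⟨d, v⟩
        · simp only [col]
          rw [show (c :: a) ++ '_' :: ([] : List Char) = (c :: a) ++ ['_'] by simp]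
          rw [rstrip_append_single, rstrip_all_ne _ hca]
          rw [show toks ('_' :: w) = toks w by rw [toks]; simp]
          rw [← toks_dropUnd w, hw]
          simp [toks, joinU]
        · have hd : (d == '_') = false := by
            have hdw : List.dropWhile (· == '_') w = d :: v := by rw [← hw]; rfl
            have := List.head_dropWhile_not (· == '_') (l := w) (by simp [hdw])
            simpa [hdw] using this
          have hlen : (dropUnd w).length ≤ n := by
            have h1 := List.length_dropWhile_le (· == '_') w
            have h2 : b.length ≤ t.length := by
              rw [hb_def]; exact List.length_dropWhile_le _ t
            rw [hb] at h2
            simp at hn h2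
            simp [dropUnd] at h1 ⊢
            omega
          have hidem : dropUnd (dropUnd w) = dropUnd w := by
            simp [dropUnd, List.dropWhile_idempotent]
          have hIH := ih (dropUnd w) hlen hidem
          rw [hw] at hIH
          have hcolne : rstripU (col (d :: v)) ≠ [] := by
            rw [col_cons_ne d v hd]
            exact rstrip_cons_ne_nil d (col v) hd
          rw [show (c :: a) ++ '_' :: col (d :: v) = ((c :: a) ++ ['_']) ++ col (d :: v) by simp]
          rw [rstrip_append _ _ hcolne, hIH]
          rw [show toks ('_' :: w) = toks w by rw [toks]; simp]
          rw [← toks_dropUnd w, hw]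
          have htne : toks (d :: v) ≠ [] := by
            rw [toks]
            simp [hd]
          rw [joinU_cons_ne_nil _ _ htne]
          simp

theorem fA_ne_und (c : Char) (h : PySem.Chars.isalnum c = true) : (fA c == '_') = false := by
  have hcne : c ≠ '_' := by
    intro hh; subst hh
    simp [PySem.Chars.isalnum, PySem.Chars.isalpha, PySem.Chars.isupper,
          PySem.Chars.islower, PySem.Chars.isdigit] at h
  unfold fA PySem.Chars.upperChar
  rw [if_pos h]
  by_cases hl : PySem.Chars.islower c = true
  · rw [if_pos hl]
    simp only [PySem.Chars.islower, Bool.and_eq_true, decide_eq_true_eq] at hl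
    have h1 : 97 ≤ c.toNat := hl.1
    have h2 : c.toNat ≤ 122 := hl.2
    simp only [beq_eq_false_iff_ne, ne_eq]
    intro heq
    have := congrArg Char.toNat heq
    rw [Char.toNat_ofNat] at this
    rw [if_pos (show (c.toNat - 32).isValidChar from Or.inl (by omega))] at this
    rw [show '_'.toNat = 95 from rfl] at this
    omega
  · rw [if_neg hl]
    simpa using hcne

theorem fold_inv (cs : List Char) : ∀ (ts : List (List Char)) (cur : List Char),
    (let st := cs.foldl bStep (ts, cur);
     if st.2 ≠ [] then st.1 ++ [st.2] else st.1) = ts ++ runsM cur (cs.map fA) := by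
  induction cs with
  | nil =>
    intro ts cur
    simp only [List.foldl_nil, List.map_nil, runsM]
    by_cases h : cur = [] <;> simp [h]
  | cons c cs ih =>
    intro ts cur
    simp only [List.foldl_cons, List.map_cons]
    by_cases halnum : PySem.Chars.isalnum c = true
    · have hfa : fA c = PySem.Chars.upperChar c := by simp [fA, halnum]
      have hfne := fA_ne_und c halnum
      rw [show bStep (ts, cur) c = (ts, cur ++ [PySem.Chars.upperChar c]) by simp [bStep, halnum]]
      rw [ih ts (cur ++ [PySem.Chars.upperChar c])]
      rw [show runsM cur (fA c :: cs.map fA) = runsM (cur ++ [fA c]) (cs.map fA) by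
        rw [runsM]; simp [hfne]]
      rw [hfa]
    · have hfa : fA c = '_' := by simp [fA, halnum]
      have halnum' : PySem.Chars.isalnum c = false := by simpa using halnum
      by_cases hcur : cur = []
      · subst hcur
        rw [show bStep (ts, []) c = (ts, []) by simp [bStep, halnum']]
        rw [ih ts []]
        rw [show runsM [] (fA c :: cs.map fA) = runsM [] (cs.map fA) by
          rw [hfa, runsM]; simp]
      · rw [show bStep (ts, cur) c = (ts ++ [cur], []) by simp [bStep, halnum', hcur]]
        rw [ih (ts ++ [cur]) []]
        rw [show runsM cur (fA c :: cs.map fA) = cur :: runsM [] (cs.map fA) by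
          rw [hfa, runsM]; simp [hcur]]
        simp

theorem runsM_toks (m : List Char) : ∀ cur,
    runsM cur m = if cur = [] then toks m
                  else (cur ++ m.takeWhile (· != '_')) :: toks (m.dropWhile (· != '_')) := by
  induction m with
  | nil =>
    intro cur
    by_cases h : cur = [] <;> simp [runsM, toks, h]
  | cons c t ih =>
    intro cur
    by_cases hc : (c == '_') = true
    · have hc' : c = '_' := by simpa using hc
      rw [runsM, if_pos hc]
      by_cases hcur : cur = []
      · subst hcur
        rw [ih []]
        simp [show toks (c :: t) = toks t from by rw [toks]; simp [hc]]
      · rw [if_neg hcur, if_neg hcur, ih [], if_pos rfl]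
        simp [hc']
        rw [show toks ('_' :: t) = toks t from by rw [toks]; simp]
    · rw [runsM, if_neg (by simp [hc])]
      rw [ih (cur ++ [c]), if_neg (by simp)]
      by_cases hcur : cur = []
      · subst hcur
        rw [if_pos rfl]
        rw [show toks (c :: t) = (c :: t.takeWhile (· != '_')) :: toks (t.dropWhile (· != '_')) by
          rw [toks]; simp [hc]]
        simp
      · rw [if_neg hcur]
        have hc' : c ≠ '_' := by simpa using hc
        simp [hc']

theorem join_eq_joinU (ts : List (List Char)) : PySem.Chars.join ['_'] ts = joinU ts := by
  induction ts with
  | nil => rfl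
  | cons t r ih =>
    cases r with
    | nil => simp [PySem.Chars.join, List.intercalate, List.intersperse, joinU]
    | cons q r' =>
      rw [joinU_cons_ne_nil _ _ (by simp)]
      rw [← ih]
      simp [PySem.Chars.join, List.intercalate, List.intersperse]

theorem stripChars_und (s : List Char) :
    PySem.Chars.stripChars s ['_'] = rstripU (dropUnd s) := by
  simp only [PySem.Chars.stripChars, rstripU, dropUnd]
  have hgen : ∀ q r : Char → Bool, q = r →
      (List.dropWhile q (List.dropWhile q s).reverse).reverse
        = (List.dropWhile r (List.dropWhile r s).reverse).reverse := by
    intro q r h; rw [h]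
  apply hgen
  funext c
  by_cases hcu : c = '_' <;> simp [hcu]

theorem names_eq (cs : List Char) :
    PySem.Chars.stripChars (collapseA (cs.map fA)) ['_'] =
      PySem.Chars.join ['_']
        (let st := cs.foldl bStep ([], []);
         if st.2 ≠ [] then st.1 ++ [st.2] else st.1) := by
  rw [fold_inv cs [] []]
  rw [runsM_toks, if_pos rfl]
  rw [collapseA_eq_col, join_eq_joinU]
  set m := cs.map fA with hm
  rw [stripChars_und (col m), lstrip_col]
  rw [mainA_aux (dropUnd m).length (dropUnd m) le_rfl
      (by simp [dropUnd, List.dropWhile_idempotent])]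
  rw [toks_dropUnd]
  simp

-- ===== VERDICT (by name: the statement is the Claim_ definition above) =====
theorem id_to_const_name_spec : Claim_equal_id_to_const_name := by
  unfold Claim_equal_id_to_const_name
  intro cmd_id _ _
  unfold Spec_id_to_const_name id_to_const_name id_to_const_name_alt
  dsimp only
  have hmap : cmd_id.toList.foldl
      (fun acc ch => acc ++ [if PySem.Chars.isalnum ch then PySem.Chars.upperChar ch else '_']) []
      = cmd_id.toList.map fA := by
    rw [show (fun (acc : List Char) ch =>
          acc ++ [if PySem.Chars.isalnum ch then PySem.Chars.upperChar ch else '_'])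
        = (fun (acc : List Char) ch => acc ++ [fA ch]) from by funext acc ch; rw [fA]]
    exact (PySem.List.foldl_append_singleton_eq_map fA cmd_id.toList []).trans (by simp)
  rw [hmap]
  rw [names_eq cmd_id.toList]
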